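-- pv_equiv track=rewrite | github.com/Squash178/Gazarr | backend/app/issue_parser.py | _strip_magazine_title
-- ===== SOURCE A (Python) =====
-- from typing import Dict, List, Optional
--
-- def _strip_magazine_title(title: str, magazine_title: Optional[str]) -> str:
--     if not magazine_title:
--         return title
--
--     target = ''.join(ch.lower() for ch in magazine_title if ch.isalnum())
--     if not target:
--         return title
--
--     count = 0
--     ti = 0
--     while ti < len(title) and count < len(target):
--         ch = title[ti]
--         if ch.isalnum():
--             if ch.lower() != target[count]:
--                 return title
--             count += 1
--         ti += 1
--
--     if count < len(target):
--         return title
--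
--     while ti < len(title) and title[ti] in " .-_:/\\|–—":
--         ti += 1
--     return title[ti:]
-- ===== SOURCE B (Python) =====
-- from typing import Optional
--
--
-- def _strip_magazine_title(title: str, magazine_title: Optional[str]) -> str:
--     if not magazine_title:
--         return title
--
--     target = ''.join(ch.lower() for ch in magazine_title if ch.isalnum())
--     if not target:
--         return title
--
--     # table of (index, lowered char) for every alnum character, built in one pass
--     positions = [(i, c.lower()) for i, c in enumerate(title) if c.isalnum()]
--     if len(positions) < len(target):
--         return title
--     if [c for _, c in positions[:len(target)]] != list(target):
--         return title
--
--     ti = positions[len(target) - 1][0] + 1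
--     rest = title[ti:]
--     while rest and rest[0] in " .-_:/\\|–—":
--         rest = rest[1:]
--     return rest
-- ===== Notes on version B (the rewrite author's own statement) =====
-- stated objective: alternative
-- what changed: B replaces A's fused character-by-character matching loop (a while over title indices carrying a match counter) by a table pass: it builds the list of (index, lowered char) of all alphanumeric characters once, compares its prefix against the target wholesale, and reads the cut index directly out of the table.
import Mathlib
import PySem

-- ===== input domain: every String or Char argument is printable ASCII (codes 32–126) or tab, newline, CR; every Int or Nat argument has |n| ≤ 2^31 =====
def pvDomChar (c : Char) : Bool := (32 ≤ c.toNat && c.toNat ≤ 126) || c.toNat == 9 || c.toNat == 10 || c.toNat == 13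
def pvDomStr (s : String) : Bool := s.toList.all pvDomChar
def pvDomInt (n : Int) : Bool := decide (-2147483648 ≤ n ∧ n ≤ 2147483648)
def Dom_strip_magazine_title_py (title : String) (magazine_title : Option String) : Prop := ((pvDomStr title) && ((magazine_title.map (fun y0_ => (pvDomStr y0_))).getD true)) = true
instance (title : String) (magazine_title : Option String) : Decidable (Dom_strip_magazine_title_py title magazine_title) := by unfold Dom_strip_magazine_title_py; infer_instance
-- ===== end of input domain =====

-- B replaces A's fused index/counter matching loop by a one-pass (index, lowered char) table of the
-- alnum characters, a wholesale prefix comparison against the target, and a table lookup for the cut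
-- index (objective: alternative decomposition, same cost).

-- ===== PORT A =====
-- separator set of the final skip loop, " .-_:/\|–—" verbatim (shared data constant)
def pvSeps : List Char := [' ', '.', '-', '_', ':', '/', '\\', '|', '–', '—']

-- A's main while loop: ti is the running title index, the second list is the unmatched tail of target;
-- none = "return title" (mismatch, or title exhausted with count < len(target)); some ti = full match.
def pvA_loop : List Char → List Char → Nat → Option Nat
  | _, [], ti => some ti
  | [], _ :: _, _ => none
  | c :: cs, t :: ts, ti =>
    if PySem.Chars.isalnum c then
      (if PySem.Chars.lowerChar c ≠ t then none else pvA_loop cs ts (ti + 1))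
    else pvA_loop cs (t :: ts) (ti + 1)

-- A's final skip loop (index advance + slice, rendered as recursion on the sliced suffix)
def pvA_skip : List Char → List Char
  | [] => []
  | c :: cs => if c ∈ pvSeps then pvA_skip cs else c :: cs

def strip_magazine_title_py (title : String) (magazine_title : Option String) : String :=
  match magazine_title with
  | none => title
  | some m =>
    if m = "" then title
    else
      let target := (m.toList.filter PySem.Chars.isalnum).map PySem.Chars.lowerChar
      if target = [] then title
      else
        match pvA_loop title.toList target 0 with
        | none => title
        | some ti => String.ofList (pvA_skip (title.toList.drop ti))

-- ===== PORT B =====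
-- [(i, c.lower()) for i, c in enumerate(title) if c.isalnum()]
def pvB_positions (l : List Char) : List (Int × Char) :=
  ((PySem.List.enumerate l).filter (fun p => PySem.Chars.isalnum p.2)).map
    (fun p => (p.1, PySem.Chars.lowerChar p.2))

-- B's final skip loop over the sliced rest
def pvB_skip : List Char → List Char
  | [] => []
  | c :: cs => if c ∈ pvSeps then pvB_skip cs else c :: cs

def strip_magazine_title_py_alt (title : String) (magazine_title : Option String) : String :=
  match magazine_title with
  | none => title
  | some m =>
    if m = "" then title
    else
      match (m.toList.filter PySem.Chars.isalnum).map PySem.Chars.lowerChar with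
      | [] => title
      | t :: ts =>
        let ps := pvB_positions title.toList
        if h2 : ps.length < (t :: ts).length then title
        else if (ps.take (t :: ts).length).map Prod.snd ≠ t :: ts then title
        else
          let ti : Int := (ps[(t :: ts).length - 1]'(by simp at h2 ⊢; omega)).1 + 1
          String.ofList (pvB_skip (title.toList.drop ti.toNat))

-- ===== PRECONDITION & SPEC =====
def Spec_strip_magazine_title_py (title : String) (magazine_title : Option String) (out : String) : Prop := out = strip_magazine_title_py_alt title magazine_title
instance (title : String) (magazine_title : Option String) (out : String) : Decidable (Spec_strip_magazine_title_py title magazine_title out) := by unfold Spec_strip_magazine_title_py; infer_instance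

-- ===== CLAIM (what is proved, stated in full; the proofs are below) =====
def Claim_equal_strip_magazine_title_py : Prop := ∀ (title : String) (magazine_title : Option String), Dom_strip_magazine_title_py title magazine_title → Spec_strip_magazine_title_py title magazine_title (strip_magazine_title_py title magazine_title)

-- ===== LEMMAS AND PROOFS =====

-- B's positions table generalized to an arbitrary enumerate start (proof helper)
def pvPsFrom (s : Int) (l : List Char) : List (Int × Char) :=
  ((PySem.List.enumerate l s).filter (fun p => PySem.Chars.isalnum p.2)).map
    (fun p => (p.1, PySem.Chars.lowerChar p.2))

theorem pvPsFrom_zero (l : List Char) : pvPsFrom 0 l = pvB_positions l := rfl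

theorem pvPsFrom_cons (s : Int) (c : Char) (cs : List Char) :
    pvPsFrom s (c :: cs) =
      if PySem.Chars.isalnum c then (s, PySem.Chars.lowerChar c) :: pvPsFrom (s + 1) cs
      else pvPsFrom (s + 1) cs := by
  simp only [pvPsFrom, PySem.List.enumerate_cons, List.filter_cons]
  split <;> simp

theorem pvSkip_eq (l : List Char) : pvA_skip l = pvB_skip l := by
  induction l with
  | nil => rfl
  | cons c cs ih => simp [pvA_skip, pvB_skip, ih]

-- characterisation of A's matching loop by B's positions table
theorem pvA_loop_eq (l : List Char) : ∀ (t : Char) (ts : List Char) (s : Nat),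
    pvA_loop l (t :: ts) s =
      (if ((pvPsFrom (s : Int) l).take (ts.length + 1)).map Prod.snd = t :: ts ∧
          ts.length + 1 ≤ (pvPsFrom (s : Int) l).length
       then ((pvPsFrom (s : Int) l)[ts.length]?).map (fun p => (p.1 + 1).toNat)
       else none) := by
  induction l with
  | nil => intro t ts s; simp [pvA_loop, pvPsFrom, PySem.List.enumerate_nil]
  | cons c cs ih =>
    intro t ts s
    have hshift : ((s : Int) + 1) = ((s + 1 : Nat) : Int) := by push_cast; ring
    rw [pvPsFrom_cons]
    by_cases ha : PySem.Chars.isalnum c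
    · simp only [ha, if_true]
      by_cases hm : PySem.Chars.lowerChar c = t
      · subst hm
        cases ts with
        | nil =>
          simp [pvA_loop, ha]
        | cons t' ts' =>
          simp only [pvA_loop, ha, if_true, ne_eq, not_true_eq_false, if_false]
          rw [ih t' ts' (s + 1), hshift]
          simp [List.take_succ_cons]
      · simp [pvA_loop, ha, hm]
    · simp only [ha, Bool.false_eq_true, if_false]
      simp only [pvA_loop, ha, Bool.false_eq_true, if_false]
      rw [ih t ts (s + 1), hshift]

-- ===== VERDICT (by name: the statement is the Claim_ definition above) =====
theorem strip_magazine_title_py_spec : Claim_equal_strip_magazine_title_py := by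
  intro title magazine_title _
  unfold Spec_strip_magazine_title_py strip_magazine_title_py strip_magazine_title_py_alt
  cases magazine_title with
  | none => rfl
  | some m =>
    by_cases hm : m = ""
    · simp [hm]
    · simp only [hm, if_false]
      cases htgt : (m.toList.filter PySem.Chars.isalnum).map PySem.Chars.lowerChar with
      | nil => simp
      | cons t ts =>
        simp only [reduceCtorEq, if_false]
        rw [pvA_loop_eq title.toList t ts 0]
        simp only [Nat.cast_zero, pvPsFrom_zero, List.length_cons, List.map_take]
        by_cases hlen : ts.length + 1 ≤ (pvB_positions title.toList).length
        · have h2 : ¬ (pvB_positions title.toList).length ≤ ts.length := by omega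
          have hlt : ts.length < (pvB_positions title.toList).length := by omega
          by_cases hpre : (List.map Prod.snd (pvB_positions title.toList)).take (ts.length + 1) = t :: ts
          · simp [hlen, hpre, h2, hlt, pvSkip_eq]
          · simp [hpre, h2]
        · have h2 : (pvB_positions title.toList).length ≤ ts.length := by omega
          simp [hlen, h2]
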